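-- pv_equiv track=rewrite | github.com/mycarrysun/terraform-aws-policy-actions | generate_aws_policy_files.py | format_terraform_output
-- ===== SOURCE A (Python) =====
-- def format_terraform_output(actions):
--     actions_to_return = {}
--     for action in actions:
--         prefix, action_name = action.split(':', 1)
--         if prefix not in actions_to_return:
--             actions_to_return[prefix] = {}
--             actions_to_return[prefix]["AllActions"] = f"{prefix}:*"
--         actions_to_return[prefix][action_name] = action
--
--     return actions_to_return
-- ===== SOURCE B (Python) =====
-- def format_terraform_output(actions):
--     # Group-major two-pass formulation: first collect the distinct prefixes in
--     # first-occurrence order, then build each prefix's inner dict with one scan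
--     # over the actions, instead of A's single pass that updates a nested dict.
--     prefixes = dict.fromkeys(action.split(':', 1)[0] for action in actions)
--     result = {}
--     for p in prefixes:
--         inner = {"AllActions": p + ":*"}
--         for action in actions:
--             pre, name = action.split(':', 1)
--             if pre == p:
--                 inner[name] = action
--         result[p] = inner
--     return result
-- ===== Notes on version B (the rewrite author's own statement) =====
-- stated objective: alternative
-- what changed: B is a group-major two-pass decomposition: it first computes the distinct prefixes in first-occurrence order (dict.fromkeys) and then builds each prefix's inner dict by its own scan over the actions, instead of A's single pass that creates/updates a nested dict entry per action.
import Mathlib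
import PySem

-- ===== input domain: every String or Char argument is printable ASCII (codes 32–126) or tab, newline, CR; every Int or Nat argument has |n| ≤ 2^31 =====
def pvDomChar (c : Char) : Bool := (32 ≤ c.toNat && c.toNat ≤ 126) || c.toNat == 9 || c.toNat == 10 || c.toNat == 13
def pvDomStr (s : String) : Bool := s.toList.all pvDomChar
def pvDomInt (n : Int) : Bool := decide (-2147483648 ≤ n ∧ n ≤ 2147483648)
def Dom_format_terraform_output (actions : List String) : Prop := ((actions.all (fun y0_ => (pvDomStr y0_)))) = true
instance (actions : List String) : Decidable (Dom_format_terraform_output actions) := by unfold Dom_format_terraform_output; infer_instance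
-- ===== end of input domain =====

-- B re-implements A as a group-major two-pass grouping (distinct prefixes first, then one scan per prefix)
-- instead of A's single pass updating a nested dict; equal output, no speed claim.


-- ===== PORT A =====
def format_terraform_output (actions : List String) : List (String × List (String × String)) :=
  let actions_to_return :=
    actions.foldl (fun actions_to_return action =>
      -- prefix, action_name = action.split(':', 1)
      match (PySem.Str.splitMax? action ":" 1).getD [] with
      | [pfx, action_name] =>
        let d1 := if actions_to_return.contains pfx then actions_to_return
                  else actions_to_return.insert pfx
                    ((PySem.Dict.empty).insert "AllActions" (pfx ++ ":*"))
        -- actions_to_return[prefix][action_name] = action  (read inner dict, update, store back)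
        d1.insert pfx ((d1.getD pfx PySem.Dict.empty).insert action_name action)
      | _ => actions_to_return)  -- unreachable under Pre_ (Python raises ValueError)
      (PySem.Dict.empty : PySem.Dict String (PySem.Dict String String))
  actions_to_return.items.map (fun kv => (kv.1, kv.2.items))

-- ===== PORT B =====
def format_terraform_output_alt (actions : List String) : List (String × List (String × String)) :=
  -- prefixes = dict.fromkeys(action.split(':', 1)[0] for action in actions)
  let prefixes := PySem.List.dedup (actions.map (fun action =>
    PySem.List.pyGetD ((PySem.Str.splitMax? action ":" 1).getD []) 0 ""))
  let result := prefixes.foldl (fun result p =>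
      let inner := actions.foldl (fun inner action =>
          -- pre, name = action.split(':', 1): exactly two parts under Pre_ (else Python raises ValueError)
          let parts := (PySem.Str.splitMax? action ":" 1).getD []
          let pre := PySem.List.pyGetD parts 0 ""
          let name := PySem.List.pyGetD parts 1 ""
          if pre == p then inner.insert name action else inner)
        ((PySem.Dict.empty).insert "AllActions" (p ++ ":*"))
      result.insert p inner)
    (PySem.Dict.empty : PySem.Dict String (PySem.Dict String String))
  result.items.map (fun kv => (kv.1, kv.2.items))

-- ===== PRECONDITION & SPEC =====
-- Pre_ excludes exactly the inputs where some action has no colon: there Python A (and B) raise ValueError.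
def Pre_format_terraform_output (actions : List String) : Prop :=
  ∀ a ∈ actions, ':' ∈ a.toList
instance (actions : List String) : Decidable (Pre_format_terraform_output actions) := by
  unfold Pre_format_terraform_output; infer_instance
def pvWitness_format_terraform_output : List String := ["ec2:Start*", "s3:Get*", "ec2:Stop"]
def Spec_format_terraform_output (actions : List String) (out : List (String × List (String × String))) : Prop := out = format_terraform_output_alt actions
instance (actions : List String) (out : List (String × List (String × String))) : Decidable (Spec_format_terraform_output actions out) := by unfold Spec_format_terraform_output; infer_instance

-- ===== CLAIM (what is proved, stated in full; the proofs are below) =====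
def Claim_equal_format_terraform_output : Prop := ∀ (actions : List String), Dom_format_terraform_output actions → Pre_format_terraform_output actions → Spec_format_terraform_output actions (format_terraform_output actions)

-- ===== LEMMAS AND PROOFS =====

-- the two halves of an action around its first colon
def preS (a : String) : String := String.ofList (a.toList.takeWhile (fun c => c != ':'))
def nmS (a : String) : String := String.ofList ((a.toList.dropWhile (fun c => c != ':')).tail)

lemma go_zero (fuel : Nat) (l cur : List Char) (acc : List (List Char)) :
    PySem.Chars.splitOnMax.go [':'] fuel 0 l cur acc = acc.reverse ++ [cur.reverse ++ l] := by
  cases fuel with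
  | zero => simp [PySem.Chars.splitOnMax.go]
  | succ f => cases l with
    | nil => simp [PySem.Chars.splitOnMax.go]
    | cons c rest => simp [PySem.Chars.splitOnMax.go]

lemma go_one (l : List Char) (fuel : Nat) (cur : List Char) (acc : List (List Char))
    (hf : l.length < fuel) (h : ':' ∈ l) :
    PySem.Chars.splitOnMax.go [':'] fuel 1 l cur acc =
      acc.reverse ++ [cur.reverse ++ l.takeWhile (fun c => c != ':'),
        (l.dropWhile (fun c => c != ':')).tail] := by
  induction l generalizing fuel cur acc with
  | nil => simp at h
  | cons c rest ih =>
    cases fuel with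
    | zero => omega
    | succ f =>
      by_cases hc : c = ':'
      · subst hc
        rw [PySem.Chars.splitOnMax.go]
        simp [List.isPrefixOf, go_zero]
      · have hm : ':' ∈ rest := by
          cases h with
          | head => exact absurd rfl hc
          | tail _ h2 => exact h2
        rw [PySem.Chars.splitOnMax.go]
        have hf' : rest.length < f := by simpa using hf
        simp [List.isPrefixOf, Ne.symm hc, ih f (c :: cur) acc hf' hm, hc]

lemma split2_eq (a : String) (h : ':' ∈ a.toList) :
    (PySem.Str.splitMax? a ":" 1).getD [] = [preS a, nmS a] := by
  have hc : (":" : String).toList = [':'] := by decide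
  rw [PySem.Str.splitMax?, PySem.Chars.splitMax?, hc]
  rw [if_neg (by simp), PySem.Chars.splitOnMax]
  rw [if_neg (by omega)]
  rw [show (1:Int).toNat = 1 from rfl, go_one a.toList (a.toList.length + 1) [] [] (by omega) h]
  simp [preS, nmS]

-- canonical (colon-free) forms of the two programs
def init0 (p0 : String) : PySem.Dict String String :=
  (PySem.Dict.empty).insert "AllActions" (p0 ++ ":*")
def innerF (acts : List String) (p0 : String) : PySem.Dict String String :=
  acts.foldl (fun inner a => if preS a == p0 then inner.insert (nmS a) a else inner) (init0 p0)
def itemsB (acts : List String) : List (String × PySem.Dict String String) :=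
  (PySem.List.dedup (acts.map preS)).map (fun p0 => (p0, innerF acts p0))
def stepRaw (d : PySem.Dict String (PySem.Dict String String)) (action : String) :
    PySem.Dict String (PySem.Dict String String) :=
  match (PySem.Str.splitMax? action ":" 1).getD [] with
  | [pfx, action_name] =>
    let d1 := if d.contains pfx then d
              else d.insert pfx ((PySem.Dict.empty).insert "AllActions" (pfx ++ ":*"))
    d1.insert pfx ((d1.getD pfx PySem.Dict.empty).insert action_name action)
  | _ => d

lemma innerF_append (acts : List String) (a : String) (p0 : String) :
    innerF (acts ++ [a]) p0 =
      if preS a == p0 then (innerF acts p0).insert (nmS a) a else innerF acts p0 := by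
  simp [innerF, List.foldl_append]

lemma innerF_not_mem (acts : List String) (p0 : String)
    (h : ∀ a ∈ acts, preS a ≠ p0) : innerF acts p0 = init0 p0 := by
  induction acts with
  | nil => rfl
  | cons a as ih =>
    have hg : (preS a == p0) = false := beq_eq_false_iff_ne.mpr (h a (by simp))
    show List.foldl _ _ (a :: as) = _
    rw [List.foldl_cons]
    simp only [hg, Bool.false_eq_true, if_false]
    exact ih (fun x hx => h x (by simp [hx]))

lemma find_canon {f : String → PySem.Dict String String} (D : List String) (k : String)
    (hk : k ∈ D) :
    List.find? (fun q => q.1 == k) (D.map (fun p0 => (p0, f p0))) = some (k, f k) := by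
  induction D with
  | nil => simp at hk
  | cons d D ih =>
    by_cases hd : d = k
    · subst hd; simp
    · have : k ∈ D := by
        cases hk with
        | head => exact absurd rfl hd
        | tail _ h2 => exact h2
      simp [hd, ih this]

lemma find_canon_none {f : String → PySem.Dict String String} (D : List String) (k : String)
    (hk : k ∉ D) :
    List.find? (fun q => q.1 == k) (D.map (fun p0 => (p0, f p0))) = none := by
  induction D with
  | nil => simp
  | cons d D ih =>
    have hd : ¬ d = k := fun e => hk (by simp [e])
    simp [hd, ih (fun e => hk (by simp [e]))]

lemma any_canon {f : String → PySem.Dict String String} (D : List String) (k : String) :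
    (D.map (fun p0 => (p0, f p0))).any (fun q => q.1 == k) = decide (k ∈ D) := by
  induction D with
  | nil => simp
  | cons d D ih =>
    by_cases hd : d = k
    · subst hd; simp
    · simp [hd, Ne.symm hd, ih]

lemma dedup_append_singleton (l : List String) (x : String) :
    PySem.List.dedup (l ++ [x]) =
      if x ∈ l then PySem.List.dedup l else PySem.List.dedup l ++ [x] := by
  simp only [PySem.List.dedup, PySem.Set.ofList, List.foldl_append, List.foldl_cons,
    List.foldl_nil]
  rw [PySem.Set.add]
  by_cases hx : x ∈ l
  · rw [if_pos hx, if_pos ((PySem.Set.contains_iff _ _).mpr (by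
      simpa [PySem.Set.ofList] using (PySem.Set.mem_ofList l x).mpr hx))]
  · rw [if_neg hx, if_neg (fun hcl => hx ((PySem.Set.mem_ofList l x).mp
      (by simpa [PySem.Set.ofList] using (PySem.Set.contains_iff _ _).mp hcl)))]

lemma stepRaw_eq (d : PySem.Dict String (PySem.Dict String String)) (a : String)
    (ha : ':' ∈ a.toList) :
    stepRaw d a =
      (if d.contains (preS a) then d else d.insert (preS a) (init0 (preS a))).insert (preS a)
        (((if d.contains (preS a) then d
           else d.insert (preS a) (init0 (preS a))).getD (preS a) PySem.Dict.empty).insert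
          (nmS a) a) := by
  unfold stepRaw
  rw [split2_eq a ha]
  rfl

lemma dictA_items (acts : List String) (h : ∀ a ∈ acts, ':' ∈ a.toList) :
    (acts.foldl stepRaw PySem.Dict.empty).items = itemsB acts := by
  induction acts using List.reverseRecOn with
  | nil => rfl
  | append_singleton xs a ih =>
    have hxs : ∀ b ∈ xs, ':' ∈ b.toList := fun b hb => h b (by simp [hb])
    have ha : ':' ∈ a.toList := h a (by simp)
    rw [List.foldl_append, List.foldl_cons, List.foldl_nil, stepRaw_eq _ a ha]
    have hit : (xs.foldl stepRaw PySem.Dict.empty).items = itemsB xs := ih hxs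
    set d := xs.foldl stepRaw PySem.Dict.empty with hd
    have hcont : d.contains (preS a) = decide (preS a ∈ xs.map preS) := by
      rw [PySem.Dict.contains, hit, itemsB, any_canon]
      simp
    have hRHS : itemsB (xs ++ [a]) =
        (if preS a ∈ xs.map preS then PySem.List.dedup (xs.map preS)
         else PySem.List.dedup (xs.map preS) ++ [preS a]).map
          (fun p0 => (p0, innerF (xs ++ [a]) p0)) := by
      rw [itemsB, List.map_append, List.map_cons, List.map_nil, dedup_append_singleton]
    by_cases hin : preS a ∈ xs.map preS
    · have hc2 : d.contains (preS a) = true := by rw [hcont]; simp [hin]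
      rw [hc2]
      simp only [if_true]
      have hget : d.getD (preS a) PySem.Dict.empty = innerF xs (preS a) := by
        rw [PySem.Dict.getD, PySem.Dict.get?, hit, itemsB,
          find_canon _ _ ((PySem.List.mem_dedup _ _).mpr hin)]
        rfl
      rw [hget, PySem.Dict.insert, hc2]
      simp only [if_true]
      show List.map _ d.items = _
      rw [hit, hRHS, if_pos hin, itemsB, List.map_map]
      apply List.map_congr_left
      intro p0 hp0
      by_cases hpe : p0 = preS a
      · subst hpe
        simp [Function.comp, innerF_append]
      · simp [Function.comp, innerF_append, hpe, Ne.symm hpe]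
    · have hc2 : d.contains (preS a) = false := by rw [hcont]; simp [hin]
      rw [hc2]
      simp only [Bool.false_eq_true, if_false]
      have hnp : preS a ∉ PySem.List.dedup (xs.map preS) := by
        rw [PySem.List.mem_dedup]; exact hin
      have he : d.insert (preS a) (init0 (preS a)) =
          PySem.Dict.mk (d.items ++ [(preS a, init0 (preS a))]) := by
        rw [PySem.Dict.insert, hc2]
        simp
      rw [he]
      have hget : (PySem.Dict.mk (d.items ++ [(preS a, init0 (preS a))])).getD (preS a)
          PySem.Dict.empty = init0 (preS a) := by
        rw [PySem.Dict.getD, PySem.Dict.get?]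
        show (Option.map _ (List.find? _ (d.items ++ [(preS a, init0 (preS a))]))).getD _ = _
        rw [List.find?_append, hit, itemsB, find_canon_none _ _ hnp]
        simp
      rw [hget, PySem.Dict.insert]
      have hc3 : (PySem.Dict.mk (d.items ++ [(preS a, init0 (preS a))])).contains
          (preS a) = true := by
        rw [PySem.Dict.contains]
        simp
      rw [hc3]
      simp only [if_true]
      show List.map _ (d.items ++ [(preS a, init0 (preS a))]) = _
      rw [List.map_append, hit, itemsB, List.map_map, hRHS, if_neg hin, List.map_append]
      congr 1
      · apply List.map_congr_left
        intro p0 hp0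
        have hpe : ¬ p0 = preS a := fun e => hnp (e ▸ hp0)
        simp [Function.comp, innerF_append, hpe, Ne.symm hpe]
      · have hnone : ∀ b ∈ xs, preS b ≠ preS a := by
          intro b hb e
          exact hin (e ▸ List.mem_map_of_mem hb)
        simp [innerF_append, innerF_not_mem xs (preS a) hnone]

lemma foldl_insert_nodup (ks : List String) (f : String → PySem.Dict String String)
    (hnd : ks.Nodup) :
    ks.foldl (fun r k => r.insert k (f k)) (PySem.Dict.empty : PySem.Dict String (PySem.Dict String String)) =
      PySem.Dict.mk (ks.map (fun k => (k, f k))) := by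
  induction ks using List.reverseRecOn with
  | nil => rfl
  | append_singleton ks k ih =>
    have hnd' : ks.Nodup ∧ k ∉ ks := by
      rw [List.nodup_append] at hnd
      exact ⟨hnd.1, fun hk => hnd.2.2 k hk k (by simp) rfl⟩
    rw [List.foldl_append, List.foldl_cons, List.foldl_nil, ih hnd'.1]
    rw [PySem.Dict.insert]
    have hc : (PySem.Dict.mk (ks.map fun k => (k, f k))).contains k = false := by
      rw [PySem.Dict.contains]
      show (ks.map fun k => (k, f k)).any (fun q => q.1 == k) = false
      rw [any_canon]
      simp [hnd'.2]
    rw [hc]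
    simp

lemma dictB_items (acts : List String) (h : ∀ a ∈ acts, ':' ∈ a.toList) :
    format_terraform_output_alt acts = (itemsB acts).map (fun kv => (kv.1, kv.2.items)) := by
  unfold format_terraform_output_alt
  have hpfx : acts.map (fun action =>
      PySem.List.pyGetD ((PySem.Str.splitMax? action ":" 1).getD []) 0 "") = acts.map preS := by
    apply List.map_congr_left
    intro a ha
    rw [split2_eq a (h a ha), PySem.List.pyGetD_zero_cons]
  rw [hpfx]
  have hinner : ∀ p : String,
      acts.foldl (fun inner action =>
          let parts := (PySem.Str.splitMax? action ":" 1).getD []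
          let pre := PySem.List.pyGetD parts 0 ""
          let name := PySem.List.pyGetD parts 1 ""
          if pre == p then inner.insert name action else inner)
        ((PySem.Dict.empty).insert "AllActions" (p ++ ":*"))
        = innerF acts p := by
    intro p
    apply PySem.List.foldl_congr_mem
    intro acc a ha
    show (let parts := (PySem.Str.splitMax? a ":" 1).getD []
          let pre := PySem.List.pyGetD parts 0 ""
          let name := PySem.List.pyGetD parts 1 ""
          if pre == p then acc.insert name a else acc) = _
    rw [split2_eq a (h a ha)]
    simp [PySem.List.pyGetD, PySem.List.pyGet?, PySem.List.pyIdx?]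
  simp only [hinner]
  rw [foldl_insert_nodup _ (innerF acts) (PySem.List.nodup_dedup _)]
  rfl

-- ===== VERDICT (by name: the statement is the Claim_ definition above) =====
theorem format_terraform_output_spec : Claim_equal_format_terraform_output := by
  intro acts _ hpre
  unfold Spec_format_terraform_output
  have hA : format_terraform_output acts = (itemsB acts).map (fun kv => (kv.1, kv.2.items)) := by
    have : format_terraform_output acts
        = (acts.foldl stepRaw PySem.Dict.empty).items.map (fun kv => (kv.1, kv.2.items)) := rfl
    rw [this, dictA_items acts hpre]
  rw [hA, dictB_items acts hpre]
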